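-- pv_equiv track=rewrite | github.com/lerhond/heroes-parser | main.py | split_on_math
-- ===== SOURCE A (Python) =====
-- CONSTS = {
--     # Valla - Strafe, E.T.C. - Stage Dive, Muradin - Haymaker, Tyrande - Starfall
--     'Effect,StormDamage,AttributeFactor[Heroic]': 0,
--     # Greymane - Hunter's Blunderbuss
--     'Behavior,GreymaneHuntersBlunderbussCarryBehavior,DamageResponse.ModifyFraction': 1,
--     # Greymane - Tooth and Claw
--     'Behavior,ToothAndClawCarryBehavior,DamageResponse.ModifyFraction': 1,
--     # Yrel - Word of Glory
--     'Effect,YrelArdentDefenderWordOfGloryCreateHealer,MultiplicativeModifierArray[WordOfGlory].Modifier': 0,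
--     # Azmodan - Azmodan - Sin's Grasp
--     'Ability,AzmodanAllShallBurn,Cost[0].CooldownTimeUse': 1,
--
--     #Auriel - Bestow Hope
--     '$BehaviorTokenCount:AurielRayOfHeavenReservoirOfHopeQuestToken$' : 0,
--     #Azmodan - Summon Demon Warrior
--     'Behavior,AzmodanSummonDemonWarriorBurningDemonBuff,Period' : 1,
--     #Kel'Thuzad - Master of the Cold Dark
--     '$BehaviorStackCount:KelThuzadMasterOfTheColdDarkToken$' : 0,
--     #Tyrael - El'druin's Might
--     'Effect,ElDruinsMightDamage,AttributeFactor[Structure]' : 0,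
--     #Varian - Parry
--     'Behavior,VarianParryIncomingDamageReduction,DamageResponse.ModifyFraction' : 0,
-- }
--
-- MATH_SYMBOLS = ['+', '-', '/', '*', '(', ')']
--
-- def split_on_math(ref):
--     if ref in CONSTS:
--         return [str(CONSTS[ref])]
--     ret = ['']
--     for c in ref:
--         if c.isspace():
--             continue
--         if c in MATH_SYMBOLS:
--             if ret[-1] == '':
--                 ret = ret[:-1]
--             ret += [c]
--             ret += ['']
--         else:
--             ret[-1] += c
--     if ret[0] == '':
--         ret = ret[1:]
--     if ret[-1] == '':
--         ret = ret[:-1]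
--     return ret
-- ===== SOURCE B (Python) =====
-- CONSTS = {
--     'Effect,StormDamage,AttributeFactor[Heroic]': 0,
--     'Behavior,GreymaneHuntersBlunderbussCarryBehavior,DamageResponse.ModifyFraction': 1,
--     'Behavior,ToothAndClawCarryBehavior,DamageResponse.ModifyFraction': 1,
--     'Effect,YrelArdentDefenderWordOfGloryCreateHealer,MultiplicativeModifierArray[WordOfGlory].Modifier': 0,
--     'Ability,AzmodanAllShallBurn,Cost[0].CooldownTimeUse': 1,
--     '$BehaviorTokenCount:AurielRayOfHeavenReservoirOfHopeQuestToken$' : 0,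
--     'Behavior,AzmodanSummonDemonWarriorBurningDemonBuff,Period' : 1,
--     '$BehaviorStackCount:KelThuzadMasterOfTheColdDarkToken$' : 0,
--     'Effect,ElDruinsMightDamage,AttributeFactor[Structure]' : 0,
--     'Behavior,VarianParryIncomingDamageReduction,DamageResponse.ModifyFraction' : 0,
-- }
--
-- MATH_SYMBOLS = ['+', '-', '/', '*', '(', ')']
--
-- def split_on_math(ref):
--     if ref in CONSTS:
--         return [str(CONSTS[ref])]
--     s = ''.join(c for c in ref if not c.isspace())
--     tokens = []
--     while s:
--         if s[0] in MATH_SYMBOLS: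
--             tokens.append(s[0])
--             s = s[1:]
--         else:
--             i = 1
--             while i < len(s) and s[i] not in MATH_SYMBOLS:
--                 i += 1
--             tokens.append(s[:i])
--             s = s[i:]
--     return tokens
-- ===== Notes on version B (the rewrite author's own statement) =====
-- stated objective: simpler
-- what changed: A threads an empty-string sentinel through a growing list (ret[-1] += c rebuilds the last operand string per character, dropping '' cells before symbols and trimming '' at both ends); B first strips all whitespace, then slices one whole token (a symbol or a maximal operand run) off the front of the string per loop step, so no per-character string rebuilding, empty-string bookkeeping or final trimming exists.
import Mathlib
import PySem

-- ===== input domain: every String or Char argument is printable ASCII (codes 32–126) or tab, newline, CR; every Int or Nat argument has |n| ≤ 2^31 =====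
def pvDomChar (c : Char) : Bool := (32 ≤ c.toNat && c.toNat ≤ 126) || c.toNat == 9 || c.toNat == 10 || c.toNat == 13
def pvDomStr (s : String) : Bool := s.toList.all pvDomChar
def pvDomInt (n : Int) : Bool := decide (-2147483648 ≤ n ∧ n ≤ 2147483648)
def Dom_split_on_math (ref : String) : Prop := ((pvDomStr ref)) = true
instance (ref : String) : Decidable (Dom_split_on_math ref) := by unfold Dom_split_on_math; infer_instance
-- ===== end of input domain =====

-- B rewrites A's empty-string-sentinel accumulator as: strip whitespace once, then slice one
-- token (a symbol or a maximal operand run) off the front per loop step — objective: simpler.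
-- Tokens are carried as List Char and converted by String.mk at the end (exact for Python's
-- string concatenation; Lean's own String.append is kernel-opaque).

-- ===== PORT A =====
def CONSTS : PySem.Dict String Int := PySem.Dict.ofList [
  ("Effect,StormDamage,AttributeFactor[Heroic]", 0),
  ("Behavior,GreymaneHuntersBlunderbussCarryBehavior,DamageResponse.ModifyFraction", 1),
  ("Behavior,ToothAndClawCarryBehavior,DamageResponse.ModifyFraction", 1),
  ("Effect,YrelArdentDefenderWordOfGloryCreateHealer,MultiplicativeModifierArray[WordOfGlory].Modifier", 0),
  ("Ability,AzmodanAllShallBurn,Cost[0].CooldownTimeUse", 1),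
  ("$BehaviorTokenCount:AurielRayOfHeavenReservoirOfHopeQuestToken$", 0),
  ("Behavior,AzmodanSummonDemonWarriorBurningDemonBuff,Period", 1),
  ("$BehaviorStackCount:KelThuzadMasterOfTheColdDarkToken$", 0),
  ("Effect,ElDruinsMightDamage,AttributeFactor[Structure]", 0),
  ("Behavior,VarianParryIncomingDamageReduction,DamageResponse.ModifyFraction", 0)]

-- MATH_SYMBOLS is a list of one-character strings in Python; membership of the one-char
-- string c in it is represented as membership of the character c.
def MATH_SYMBOLS : List Char := ['+', '-', '/', '*', '(', ')']

-- one iteration of A's `for c in ref` body (ret is never [] while the loop runs)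
def aStep (ret : List (List Char)) (c : Char) : List (List Char) :=
  if PySem.Chars.isspace c then ret
  else if c ∈ MATH_SYMBOLS then
    (if ret.getLast? = some [] then ret.dropLast else ret) ++ [[c], []]
  else ret.dropLast ++ [ret.getLast?.getD [] ++ [c]]    -- ret[-1] += c

def split_on_math (ref : String) : List String :=
  match CONSTS.get? ref with
  | some v => [PySem.Int.toStr v]
  | none =>
    let ret := ref.toList.foldl aStep [[]]
    let ret := if ret.head? = some [] then ret.tail else ret
    -- final `ret[-1]`: raises IndexError when ret = [] (whitespace-only ref); excluded by Pre_
    let ret := if ret.getLast? = some [] then ret.dropLast else ret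
    ret.map String.mk

-- ===== PORT B =====
-- Source B's `while s:` loop: one token sliced off the front per iteration.
-- fuel (called with fuel = s.length, which the loop never exhausts) only makes the
-- recursion structural; it changes no computed value.
def bLoop (fuel : Nat) (s : List Char) (tokens : List (List Char)) : List (List Char) :=
  match fuel, s with
  | _, [] => tokens
  | 0, _ :: _ => tokens
  | fuel + 1, c :: rest =>
    if c ∈ MATH_SYMBOLS then bLoop fuel rest (tokens ++ [[c]])
    else bLoop fuel (rest.dropWhile (fun d => !decide (d ∈ MATH_SYMBOLS)))
                    (tokens ++ [c :: rest.takeWhile (fun d => !decide (d ∈ MATH_SYMBOLS))])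

def split_on_math_alt (ref : String) : List String :=
  match CONSTS.get? ref with
  | some v => [PySem.Int.toStr v]
  | none =>
    let s := ref.toList.filter (fun c => !PySem.Chars.isspace c)
    (bLoop s.length s []).map String.mk

-- ===== PRECONDITION & SPEC =====
-- Pre_ excludes exactly the inputs where A raises IndexError: strings not in CONSTS whose
-- characters are all whitespace (A's final `ret[-1]` check indexes an empty list there).
def Pre_split_on_math (ref : String) : Prop :=
  (CONSTS.get? ref).isSome = true ∨ ref.toList.any (fun c => !PySem.Chars.isspace c) = true
instance (ref : String) : Decidable (Pre_split_on_math ref) := by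
  unfold Pre_split_on_math; infer_instance

def pvWitness_split_on_math : String := "a+b"

def Spec_split_on_math (ref : String) (out : List String) : Prop := out = split_on_math_alt ref
instance (ref : String) (out : List String) : Decidable (Spec_split_on_math ref out) := by
  unfold Spec_split_on_math; infer_instance

-- ===== CLAIM =====
def Claim_equal_split_on_math : Prop :=
  ∀ (ref : String), Dom_split_on_math ref → Pre_split_on_math ref →
    Spec_split_on_math ref (split_on_math ref)

-- ===== LEMMAS AND PROOFS =====

-- `Btok cs` = the token list Source B's while-loop produces from the whitespace-free cs
def Btok (cs : List Char) : List (List Char) := bLoop cs.length cs []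

theorem bLoop_acc : ∀ (n f : Nat) (cs : List Char) (ts : List (List Char)), f ≤ n →
    cs.length ≤ f → bLoop f cs ts = ts ++ Btok cs := by
  intro n
  induction n with
  | zero =>
    intro f cs ts hf h
    have hf0 : f = 0 := Nat.le_zero.mp hf
    subst hf0
    have : cs = [] := by cases cs <;> simp_all
    subst this; simp [bLoop, Btok]
  | succ n ih =>
    intro f cs ts hf h
    cases f with
    | zero =>
      have : cs = [] := by cases cs <;> simp_all
      subst this; simp [bLoop, Btok]
    | succ f =>
      cases cs with
      | nil => simp [bLoop, Btok]
      | cons c rest =>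
        have hfn : f ≤ n := Nat.le_of_succ_le_succ hf
        have hr : rest.length ≤ f := by simpa using h
        have hrn : rest.length ≤ n := le_trans hr hfn
        by_cases hc : c ∈ MATH_SYMBOLS
        · rw [show bLoop (f+1) (c::rest) ts = bLoop f rest (ts ++ [[c]]) from by
                simp [bLoop, hc]]
          rw [show Btok (c::rest) = bLoop rest.length rest [[c]] from by
                simp only [Btok, List.length_cons]
                simp [bLoop, hc]]
          rw [ih f rest _ hfn hr, ih rest.length rest _ hrn le_rfl]
          simp [Btok]
        · have hdl : (rest.dropWhile (fun d => !decide (d ∈ MATH_SYMBOLS))).length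
              ≤ rest.length := List.length_dropWhile_le _ _
          rw [show bLoop (f+1) (c::rest) ts
                = bLoop f (rest.dropWhile (fun d => !decide (d ∈ MATH_SYMBOLS)))
                    (ts ++ [c :: rest.takeWhile (fun d => !decide (d ∈ MATH_SYMBOLS))]) from by
                simp [bLoop, hc]]
          rw [show Btok (c::rest)
                = bLoop rest.length (rest.dropWhile (fun d => !decide (d ∈ MATH_SYMBOLS)))
                    [c :: rest.takeWhile (fun d => !decide (d ∈ MATH_SYMBOLS))] from by
                simp only [Btok, List.length_cons]
                simp [bLoop, hc]]
          rw [ih f _ _ hfn (le_trans hdl hr), ih rest.length _ _ hrn hdl]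
          simp [Btok]

theorem bLoop_acc' (f : Nat) (cs : List Char) (ts : List (List Char)) (h : cs.length ≤ f) :
    bLoop f cs ts = ts ++ Btok cs :=
  bLoop_acc f f cs ts le_rfl h

theorem Btok_nil : Btok [] = [] := rfl

theorem Btok_cons_sym {c : Char} {rest : List Char} (hc : c ∈ MATH_SYMBOLS) :
    Btok (c :: rest) = [c] :: Btok rest := by
  simp only [Btok, List.length_cons]
  rw [show bLoop (rest.length + 1) (c::rest) [] = bLoop rest.length rest ([] ++ [[c]]) from by
        simp [bLoop, hc]]
  rw [bLoop_acc' _ _ _ le_rfl]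
  simp [Btok]

theorem Btok_cons_nonsym {c : Char} {rest : List Char} (hc : c ∉ MATH_SYMBOLS) :
    Btok (c :: rest) = (c :: rest.takeWhile (fun d => !decide (d ∈ MATH_SYMBOLS)))
      :: Btok (rest.dropWhile (fun d => !decide (d ∈ MATH_SYMBOLS))) := by
  simp only [Btok, List.length_cons]
  rw [show bLoop (rest.length + 1) (c::rest) []
        = bLoop rest.length (rest.dropWhile (fun d => !decide (d ∈ MATH_SYMBOLS)))
            ([] ++ [c :: rest.takeWhile (fun d => !decide (d ∈ MATH_SYMBOLS))]) from by
      simp [bLoop, hc]]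
  rw [bLoop_acc' _ _ _ (List.length_dropWhile_le _ _)]
  simp [Btok]

theorem nil_not_mem_Btok : ∀ (n : Nat) (cs : List Char), cs.length ≤ n → [] ∉ Btok cs := by
  intro n
  induction n with
  | zero =>
    intro cs h
    have : cs = [] := by cases cs <;> simp_all
    subst this; simp [Btok_nil]
  | succ n ih =>
    intro cs h
    cases cs with
    | nil => simp [Btok_nil]
    | cons c rest =>
      have hr : rest.length ≤ n := by simpa using h
      by_cases hc : c ∈ MATH_SYMBOLS
      · rw [Btok_cons_sym hc]; simp [ih rest hr]
      · rw [Btok_cons_nonsym hc]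
        simp [ih _ (le_trans (List.length_dropWhile_le _ _) hr)]

theorem Btok_ne_nil {cs : List Char} (h : cs ≠ []) : Btok cs ≠ [] := by
  cases cs with
  | nil => exact absurd rfl h
  | cons c rest =>
    by_cases hc : c ∈ MATH_SYMBOLS
    · rw [Btok_cons_sym hc]; simp
    · rw [Btok_cons_nonsym hc]; simp

-- A-side loop lemmas -------------------------------------------------------

theorem aStep_sym {c : Char} (ret : List (List Char)) (hsp : PySem.Chars.isspace c = false)
    (hc : c ∈ MATH_SYMBOLS) :
    aStep ret c = (if ret.getLast? = some [] then ret.dropLast else ret) ++ [[c], []] := by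
  simp [aStep, hsp, hc]

theorem aStep_nonsym {c : Char} (ret : List (List Char)) (hsp : PySem.Chars.isspace c = false)
    (hc : c ∉ MATH_SYMBOLS) :
    aStep ret c = ret.dropLast ++ [ret.getLast?.getD [] ++ [c]] := by
  simp [aStep, hsp, hc]

theorem aStep_ne_nil {c : Char} (ret : List (List Char)) (hsp : PySem.Chars.isspace c = false) :
    aStep ret c ≠ [] := by
  by_cases hc : c ∈ MATH_SYMBOLS
  · rw [aStep_sym ret hsp hc]; simp
  · rw [aStep_nonsym ret hsp hc]; simp

theorem aStep_append {ts st : List (List Char)} {c : Char} (hst : st ≠ [])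
    (hsp : PySem.Chars.isspace c = false) : aStep (ts ++ st) c = ts ++ aStep st c := by
  obtain ⟨a, ha⟩ := Option.isSome_iff_exists.mp (List.getLast?_isSome.mpr hst)
  by_cases hc : c ∈ MATH_SYMBOLS
  · rw [aStep_sym _ hsp hc, aStep_sym _ hsp hc, List.getLast?_append, ha, Option.some_or]
    split_ifs with h
    · simp [List.dropLast_append_of_ne_nil hst]
    · simp
  · rw [aStep_nonsym _ hsp hc, aStep_nonsym _ hsp hc, List.getLast?_append, ha, Option.some_or,
        List.dropLast_append_of_ne_nil hst]
    simp

theorem foldl_aStep_append : ∀ (cs : List Char) (ts st : List (List Char)), st ≠ [] →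
    (∀ c ∈ cs, PySem.Chars.isspace c = false) →
    cs.foldl aStep (ts ++ st) = ts ++ cs.foldl aStep st := by
  intro cs
  induction cs with
  | nil => intro ts st _ _; simp
  | cons c rest ih =>
    intro ts st hst hns
    have hsp : PySem.Chars.isspace c = false := hns c (by simp)
    rw [List.foldl_cons, List.foldl_cons, aStep_append hst hsp]
    exact ih ts _ (aStep_ne_nil st hsp) (fun d hd => hns d (by simp [hd]))

theorem foldl_aStep_filter : ∀ (cs : List Char) (ret : List (List Char)),
    cs.foldl aStep ret = (cs.filter (fun c => !PySem.Chars.isspace c)).foldl aStep ret := by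
  intro cs
  induction cs with
  | nil => intro ret; rfl
  | cons c rest ih =>
    intro ret
    by_cases hsp : PySem.Chars.isspace c = true
    · rw [List.foldl_cons, show aStep ret c = ret by simp [aStep, hsp]]
      simp [hsp, ih]
    · simp only [List.foldl_cons, List.filter_cons]
      simp only [Bool.not_eq_true] at hsp
      simp [hsp, ih]

-- consuming a run of non-symbol characters just extends the last buffer
theorem foldl_aStep_run : ∀ (run xs : List Char) (b : List Char),
    (∀ d ∈ run, d ∉ MATH_SYMBOLS) → (∀ d ∈ run, PySem.Chars.isspace d = false) →
    (run ++ xs).foldl aStep [b] = xs.foldl aStep [b ++ run] := by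
  intro run
  induction run with
  | nil => intro xs b _ _; simp
  | cons d run ih =>
    intro xs b hsym hns
    have h1 : aStep [b] d = [b ++ [d]] := by
      rw [aStep_nonsym _ (hns d (by simp)) (hsym d (by simp))]; simp
    rw [List.cons_append, List.foldl_cons, h1,
        ih xs (b ++ [d]) (fun e he => hsym e (by simp [he])) (fun e he => hns e (by simp [he]))]
    simp

-- does the token list end in A's dangling empty buffer? (iff cs is empty or ends in a symbol)
def endsSym (cs : List Char) : Bool :=
  match cs.getLast? with
  | none => true
  | some c => decide (c ∈ MATH_SYMBOLS)

theorem endsSym_nonsym {cs : List Char} (hne : cs ≠ [])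
    (h : ∀ d ∈ cs, d ∉ MATH_SYMBOLS) : endsSym cs = false := by
  obtain ⟨a, ha⟩ := Option.isSome_iff_exists.mp (List.getLast?_isSome.mpr hne)
  simp [endsSym, ha, h a (List.mem_of_getLast? ha)]

-- the main invariant: A's loop from state [''] = B's tokens, plus a dangling '' buffer
theorem main_inv : ∀ (n : Nat) (cs : List Char), cs.length ≤ n →
    (∀ c ∈ cs, PySem.Chars.isspace c = false) →
    cs.foldl aStep [[]] = Btok cs ++ (if endsSym cs then [[]] else []) := by
  intro n
  induction n with
  | zero =>
    intro cs h _
    have : cs = [] := by cases cs <;> simp_all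
    subst this; simp [Btok_nil, endsSym]
  | succ n ih =>
    intro cs h hns
    cases cs with
    | nil => simp [Btok_nil, endsSym]
    | cons c rest =>
      have hr : rest.length ≤ n := by simpa using h
      have hsp : PySem.Chars.isspace c = false := hns c (by simp)
      have hnsr : ∀ d ∈ rest, PySem.Chars.isspace d = false := fun d hd => hns d (by simp [hd])
      by_cases hc : c ∈ MATH_SYMBOLS
      · have h1 : aStep [[]] c = [[c]] ++ [[]] := by rw [aStep_sym _ hsp hc]; simp
        rw [List.foldl_cons, h1, foldl_aStep_append rest [[c]] [[]] (by simp) hnsr,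
            ih rest hr hnsr, Btok_cons_sym hc]
        cases rest with
        | nil => simp [Btok_nil, endsSym, hc]
        | cons d rs => simp [endsSym, List.getLast?_cons_cons]
      · have h1 : aStep [[]] c = [[c]] := by rw [aStep_nonsym _ hsp hc]; simp
        have hsplit : rest.takeWhile (fun d => !decide (d ∈ MATH_SYMBOLS))
            ++ rest.dropWhile (fun d => !decide (d ∈ MATH_SYMBOLS)) = rest :=
          List.takeWhile_append_dropWhile
        have hrunSym : ∀ d ∈ rest.takeWhile (fun d => !decide (d ∈ MATH_SYMBOLS)),
            d ∉ MATH_SYMBOLS := by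
          intro d hd
          have := List.mem_takeWhile_imp hd
          simpa using this
        have hrunMem : ∀ d ∈ rest.takeWhile (fun d => !decide (d ∈ MATH_SYMBOLS)), d ∈ rest :=
          fun d hd => (List.takeWhile_sublist _).subset hd
        have hdropMem : ∀ d ∈ rest.dropWhile (fun d => !decide (d ∈ MATH_SYMBOLS)), d ∈ rest :=
          fun d hd => (List.dropWhile_sublist _).subset hd
        rw [List.foldl_cons, h1,
            show rest.foldl aStep [[c]]
              = (rest.takeWhile (fun d => !decide (d ∈ MATH_SYMBOLS))
                 ++ rest.dropWhile (fun d => !decide (d ∈ MATH_SYMBOLS))).foldl aStep [[c]] by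
              rw [hsplit],
            foldl_aStep_run _ _ [c] hrunSym (fun d hd => hnsr d (hrunMem d hd)),
            Btok_cons_nonsym hc]
        cases hrest' : rest.dropWhile (fun d => !decide (d ∈ MATH_SYMBOLS)) with
        | nil =>
          have hresteq : rest.takeWhile (fun d => !decide (d ∈ MATH_SYMBOLS)) = rest := by
            have h' := hsplit
            rw [hrest', List.append_nil] at h'
            exact h'
          have hES : endsSym (c :: rest) = false := by
            refine endsSym_nonsym (by simp) ?_
            intro d hd
            rcases List.mem_cons.mp hd with h' | h'
            · subst h'; exact hc
            · exact hrunSym d (by rw [hresteq]; exact h')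
          simp [Btok_nil, hES]
        | cons d rs' =>
          have hdsym : d ∈ MATH_SYMBOLS := by
            have := List.head?_dropWhile_not (fun d => !decide (d ∈ MATH_SYMBOLS)) rest
            rw [hrest'] at this
            simpa using this
          have hdsp : PySem.Chars.isspace d = false :=
            hnsr d (hdropMem d (by rw [hrest']; simp))
          have hnsrs' : ∀ e ∈ d :: rs', PySem.Chars.isspace e = false := by
            intro e he
            exact hnsr e (hdropMem e (by rw [hrest']; exact he))
          have hlen' : (d :: rs').length ≤ n := by
            rw [← hrest']
            exact le_trans (List.length_dropWhile_le _ _) hr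
          have e1 : aStep [c :: rest.takeWhile (fun d => !decide (d ∈ MATH_SYMBOLS))] d
              = [c :: rest.takeWhile (fun d => !decide (d ∈ MATH_SYMBOLS))] ++ [[d], []] := by
            rw [aStep_sym _ hdsp hdsym]; simp
          have e2 : aStep [[]] d = [[d], []] := by rw [aStep_sym _ hdsp hdsym]; simp
          have key : (d :: rs').foldl aStep [c :: rest.takeWhile (fun d => !decide (d ∈ MATH_SYMBOLS))]
              = (c :: rest.takeWhile (fun d => !decide (d ∈ MATH_SYMBOLS)))
                  :: (d :: rs').foldl aStep [[]] := by
            rw [List.foldl_cons, List.foldl_cons, e1, e2,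
                foldl_aStep_append rs' _ [[d], []] (by simp)
                  (fun e he => hnsrs' e (by simp [he]))]
            simp
          have hES : endsSym (c :: rest) = endsSym (d :: rs') := by
            have hgl : (c :: rest).getLast? = (d :: rs').getLast? := by
              obtain ⟨a, ha⟩ := Option.isSome_iff_exists.mp
                (List.getLast?_isSome.mpr (List.cons_ne_nil d rs'))
              rw [show c :: rest
                    = (c :: rest.takeWhile (fun d => !decide (d ∈ MATH_SYMBOLS)))
                      ++ (d :: rs') by rw [← hrest', List.cons_append, hsplit]]
              rw [List.getLast?_append, ha, Option.some_or]
            simp [endsSym, hgl]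
          simp only [List.singleton_append] 
          rw [key, ih (d :: rs') hlen' hnsrs', hES]
          simp

-- ===== VERDICT =====

theorem split_on_math_spec : Claim_equal_split_on_math := by
  intro ref _ hpre
  unfold Spec_split_on_math split_on_math split_on_math_alt
  cases hget : CONSTS.get? ref with
  | some v => rfl
  | none =>
    simp only []
    have hpre' : ∃ c ∈ ref.toList, PySem.Chars.isspace c = false := by
      rcases hpre with h | h
      · rw [hget] at h; simp at h
      · obtain ⟨c, hc, h2⟩ := List.any_eq_true.mp h
        exact ⟨c, hc, by simpa using h2⟩
    have hFne : ref.toList.filter (fun c => !PySem.Chars.isspace c) ≠ [] := by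
      obtain ⟨c, hc, hcs⟩ := hpre'
      intro h
      have : c ∈ ref.toList.filter (fun c => !PySem.Chars.isspace c) :=
        List.mem_filter.mpr ⟨hc, by simp [hcs]⟩
      simp [h] at this
    have hFNS : ∀ c ∈ ref.toList.filter (fun c => !PySem.Chars.isspace c),
        PySem.Chars.isspace c = false := by
      intro c hc
      have := (List.mem_filter.mp hc).2
      simpa using this
    rw [foldl_aStep_filter ref.toList [[]],
        main_inv (ref.toList.filter (fun c => !PySem.Chars.isspace c)).length _ le_rfl hFNS]
    have hTmem : [] ∉ Btok (ref.toList.filter (fun c => !PySem.Chars.isspace c)) :=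
      nil_not_mem_Btok _ _ le_rfl
    rw [show bLoop (ref.toList.filter (fun c => !PySem.Chars.isspace c)).length
          (ref.toList.filter (fun c => !PySem.Chars.isspace c)) []
        = Btok (ref.toList.filter (fun c => !PySem.Chars.isspace c)) from rfl]
    cases hT : Btok (ref.toList.filter (fun c => !PySem.Chars.isspace c)) with
    | nil => exact absurd hT (Btok_ne_nil hFne)
    | cons t ts =>
      have ht : t ≠ [] := by
        intro h; rw [hT, h] at hTmem; exact hTmem (by simp)
      by_cases he : endsSym (ref.toList.filter (fun c => !PySem.Chars.isspace c))
      · simp only [he, if_true, List.cons_append]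
        have hh : (t :: (ts ++ [([] : List Char)])).head? = some t := rfl
        have hg : (t :: (ts ++ [([] : List Char)])).getLast? = some [] := by
          rw [← List.cons_append]; exact List.getLast?_concat
        have hd : (t :: (ts ++ [([] : List Char)])).dropLast = t :: ts := by
          rw [← List.cons_append]; exact List.dropLast_concat
        rw [hh]
        rw [if_neg (show ¬(some t = some ([] : List Char)) from by simp [ht])]
        rw [hg]
        rw [if_pos (rfl : some ([] : List Char) = some [])]
        rw [hd]
      · rw [Bool.not_eq_true] at he
        simp only [he, Bool.false_eq_true, if_false, List.append_nil]
        have hh : (t :: ts).head? = some t := rfl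
        rw [hh]
        rw [if_neg (show ¬(some t = some ([] : List Char)) from by simp [ht])]
        obtain ⟨a, ha⟩ := Option.isSome_iff_exists.mp
          (List.getLast?_isSome.mpr (List.cons_ne_nil t ts))
        have hamem : a ∈ Btok (ref.toList.filter (fun c => !PySem.Chars.isspace c)) := by
          rw [hT]; exact List.mem_of_getLast? ha
        have hane : a ≠ [] := by intro h; rw [h] at hamem; exact hTmem hamem
        rw [ha]
        rw [if_neg (show ¬(some a = some ([] : List Char)) from by simp [hane])]
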